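-- pv_equiv track=rewrite | github.com/naumovda/python | matrices_src.py | ColNonzero
-- ===== SOURCE A (Python) =====
-- def ColNonzero(a, row, col):
--     """
--     Return number of columns that do not contain zero elements
--     Parameters:
--         a: array
--             Input array (rectangular)
--         row: int
--             Number of rows of array
--         col: int
--             Number of columns of array
--     """
--     count = 0
--     for j in range(col):
--         zero = False
--         for i in range(row):
--             if a[i][j] == 0:
--                 zero = True
--                 break
--         if not zero:
--             count += 1
--     return count
-- ===== SOURCE B (Python) =====
-- def ColNonzero(a, row, col):
--     """
--     Return number of columns that do not contain zero elements
--     (single row-major sweep marking disqualified columns, then count the rest).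
--     """
--     bad = set()
--     for i, r in enumerate(a):
--         if i >= row:
--             break
--         for j in range(col):
--             if r[j] == 0:
--                 bad.add(j)
--     return sum(1 for j in range(col) if j not in bad)
-- ===== Notes on version B (the rewrite author's own statement) =====
-- stated objective: alternative
-- what changed: Replaces A's per-column scan with an early break and a boolean flag by a single row-major sweep that collects the set of columns containing a zero, then counts the columns outside that set.
-- outside the precondition, e.g. on ColNonzero([[0], []], 2, 1): A returns 0, B raises IndexError; on ColNonzero([[0]], 5, 1): A returns 0, B returns 0
import Mathlib
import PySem

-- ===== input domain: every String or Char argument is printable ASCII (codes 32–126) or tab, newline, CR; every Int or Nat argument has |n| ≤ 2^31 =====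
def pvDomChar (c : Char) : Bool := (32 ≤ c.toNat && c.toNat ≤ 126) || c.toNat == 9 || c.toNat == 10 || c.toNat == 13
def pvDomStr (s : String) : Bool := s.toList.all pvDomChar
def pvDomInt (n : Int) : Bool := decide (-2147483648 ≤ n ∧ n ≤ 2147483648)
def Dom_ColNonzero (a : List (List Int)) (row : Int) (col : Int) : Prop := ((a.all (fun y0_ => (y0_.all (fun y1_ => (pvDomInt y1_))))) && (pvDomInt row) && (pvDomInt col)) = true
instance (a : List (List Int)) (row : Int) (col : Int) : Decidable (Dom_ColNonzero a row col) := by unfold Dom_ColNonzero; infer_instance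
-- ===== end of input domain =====

-- B replaces A's per-column scan (early break + flag) by one row-major sweep that
-- collects the set of columns containing a zero, then counts the columns outside it.

-- ===== PORT A =====
-- for j in range(col): scan rows until a zero is found (break), count flag-free columns
def ColNonzero (a : List (List Int)) (row : Int) (col : Int) : Int :=
  (PySem.List.pyRange 0 col 1).foldl
    (fun count j =>
      let zero := (PySem.List.pyRange 0 row 1).any
        (fun i => PySem.List.pyGetD (PySem.List.pyGetD a i []) j 1 == 0)
      if zero then count else count + 1)
    0

-- ===== PORT B =====
-- 'for i, r in enumerate(a): if i >= row: break' — the indices of enumerate increase, so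
-- the loop with break is exactly takeWhile (p.1 < row); then the row-major sweep adds
-- every column index holding a zero to a set; finally sum(1 for j in range(col) if j not in bad)
def ColNonzero_alt (a : List (List Int)) (row : Int) (col : Int) : Int :=
  let bad : PySem.Set Int :=
    ((PySem.List.enumerate a 0).takeWhile (fun p => decide (p.1 < row))).foldl
      (fun s p =>
        (PySem.List.pyRange 0 col 1).foldl
          (fun s j =>
            if PySem.List.pyGetD p.2 j 1 == 0 then PySem.Set.add s j else s)
          s)
      PySem.Set.empty
  ((PySem.List.pyRange 0 col 1).map
    (fun j => if !PySem.Set.contains bad j then (1 : Int) else 0)).sum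

-- ===== PRECONDITION & SPEC =====
-- Pre_ is the natural domain on which neither sweep leaves the matrix: either no cell is
-- visited (row ≤ 0 or col ≤ 0) or the first row rows exist and each has ≥ col entries.
-- It excludes ragged/short matrices on which A returns only because its early break
-- stops at a zero before an out-of-range access (B's full sweep raises IndexError there).
def Pre_ColNonzero (a : List (List Int)) (row : Int) (col : Int) : Prop :=
  row ≤ 0 ∨ col ≤ 0 ∨
    (row ≤ (a.length : Int) ∧ ∀ r ∈ a.take row.toNat, col ≤ (r.length : Int))
instance (a : List (List Int)) (row : Int) (col : Int) : Decidable (Pre_ColNonzero a row col) := by unfold Pre_ColNonzero; infer_instance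

def pvWitness_ColNonzero : List (List Int) × Int × Int := ([[1, 0], [2, 3]], 2, 2)

def Spec_ColNonzero (a : List (List Int)) (row : Int) (col : Int) (out : Int) : Prop := out = ColNonzero_alt a row col
instance (a : List (List Int)) (row : Int) (col : Int) (out : Int) : Decidable (Spec_ColNonzero a row col out) := by unfold Spec_ColNonzero; infer_instance

-- ===== CLAIM (what is proved, stated in full; the proofs are below) =====
def Claim_equal_ColNonzero : Prop := ∀ (a : List (List Int)) (row : Int) (col : Int), Dom_ColNonzero a row col → Pre_ColNonzero a row col → Spec_ColNonzero a row col (ColNonzero a row col)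

-- ===== LEMMAS AND PROOFS =====

-- the break at i ≥ row keeps exactly the first (row - s) enumerated rows
theorem takeWhile_enumerate (a : List (List Int)) (row : Int) :
    ∀ s : Int, (PySem.List.enumerate a s).takeWhile (fun p => decide (p.1 < row)) =
      PySem.List.enumerate (a.take (row - s).toNat) s := by
  induction a with
  | nil => intro s; simp [PySem.List.enumerate_nil]
  | cons x xs ih =>
    intro s
    rw [PySem.List.enumerate_cons]
    by_cases h : s < row
    · have h1 : (row - s).toNat = (row - (s + 1)).toNat + 1 := by omega
      rw [h1, List.take_succ_cons, PySem.List.enumerate_cons]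
      simp only [List.takeWhile_cons, decide_eq_true h]
      rw [ih (s + 1)]
      simp
    · have h1 : (row - s).toNat = 0 := by omega
      simp [h1, h, PySem.List.enumerate_nil]

-- membership in the inner (per-row) fold of B
theorem mem_inner_fold (p : Int → Bool) (C : List Int) (s : PySem.Set Int) (y : Int) :
    y ∈ C.foldl (fun s j => if p j then PySem.Set.add s j else s) s ↔
      y ∈ s ∨ (y ∈ C ∧ p y) := by
  induction C generalizing s with
  | nil => simp
  | cons c C ih =>
    simp only [List.foldl_cons, ih]
    by_cases h : p c
    · simp only [h, if_pos, PySem.Set.mem_add]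
      constructor
      · rintro (⟨hy | rfl⟩ | ⟨hC, hp⟩)
        · exact Or.inl hy
        · exact Or.inr ⟨List.mem_cons_self, h⟩
        · exact Or.inr ⟨List.mem_cons_of_mem _ hC, hp⟩
      · rintro (hy | ⟨hC, hp⟩)
        · exact Or.inl (Or.inl hy)
        · rcases List.mem_cons.mp hC with rfl | hC
          · exact Or.inl (Or.inr rfl)
          · exact Or.inr ⟨hC, hp⟩
    · simp only [h]
      constructor
      · rintro (hy | ⟨hC, hp⟩)
        · exact Or.inl hy
        · exact Or.inr ⟨List.mem_cons_of_mem _ hC, hp⟩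
      · rintro (hy | ⟨hC, hp⟩)
        · exact Or.inl hy
        · rcases List.mem_cons.mp hC with rfl | hC
          · exact absurd hp h
          · exact Or.inr ⟨hC, hp⟩

-- membership in B's double fold: the columns in C holding a zero in some row of R
theorem mem_outer_fold {α : Type} (q : α → Int → Bool) (R : List α) (C : List Int)
    (s : PySem.Set Int) (y : Int) :
    y ∈ R.foldl (fun s r => C.foldl (fun s j => if q r j then PySem.Set.add s j else s) s) s ↔
      y ∈ s ∨ (y ∈ C ∧ ∃ r ∈ R, q r y) := by
  induction R generalizing s with
  | nil => simp
  | cons r R ih =>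
    simp only [List.foldl_cons, ih, mem_inner_fold]
    constructor
    · rintro ((hy | ⟨hC, hq⟩) | ⟨hC, x, hx, hq⟩)
      · exact Or.inl hy
      · exact Or.inr ⟨hC, r, List.mem_cons_self, hq⟩
      · exact Or.inr ⟨hC, x, List.mem_cons_of_mem _ hx, hq⟩
    · rintro (hy | ⟨hC, x, hx, hq⟩)
      · exact Or.inl (Or.inl hy)
      · rcases List.mem_cons.mp hx with rfl | hx
        · exact Or.inl (Or.inr ⟨hC, hq⟩)
        · exact Or.inr ⟨hC, x, hx, hq⟩

-- A's counting fold is a countP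
theorem foldl_count_not (q : Int → Bool) (C : List Int) :
    C.foldl (fun count j => if q j then count else count + 1) (0 : Int) =
      (C.countP (fun j => !q j) : Int) := by
  have h : (fun (count : Int) j => if q j then count else count + 1) =
      (fun (count : Int) j => if (!q j) then count + 1 else count) := by
    funext count j; cases q j <;> simp
  rw [h, PySem.List.foldl_count_if (fun j => !q j) C 0, zero_add]

-- the rows B sweeps see a zero in column j exactly when A's per-column index scan does
theorem rows_bridge (a : List (List Int)) (row j : Int) :
    (∃ r ∈ a.take row.toNat, (PySem.List.pyGetD r j 1 == 0) = true) ↔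
      ∃ i ∈ PySem.List.pyRange 0 row 1,
        (PySem.List.pyGetD (PySem.List.pyGetD a i []) j 1 == 0) = true := by
  constructor
  · rintro ⟨r, hr, hq⟩
    obtain ⟨k, hk, rfl⟩ := List.mem_take_iff_getElem.mp hr
    refine ⟨(k : Int), ?_, ?_⟩
    · rw [PySem.List.mem_pyRange_one]; omega
    · rw [PySem.List.pyGetD_natCast, List.getD_eq_getElem _ _ (by omega)]
      exact hq
  · rintro ⟨i, hi, hq⟩
    rw [PySem.List.mem_pyRange_one] at hi
    obtain ⟨k, rfl⟩ := Int.eq_ofNat_of_zero_le hi.1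
    rw [PySem.List.pyGetD_natCast] at hq
    by_cases hk : k < a.length
    · refine ⟨a[k], List.mem_take_iff_getElem.mpr ⟨k, by omega, rfl⟩, ?_⟩
      rwa [List.getD_eq_getElem _ _ hk] at hq
    · rw [List.getD_eq_default _ _ (by omega)] at hq
      simp [PySem.List.pyGetD, PySem.List.pyGet?] at hq

-- the two ports agree (the precondition is not even needed for the ports: out-of-range
-- cells read as the nonzero default 1 in port A, and port B never leaves the matrix)
theorem ColNonzero_eq_alt (a : List (List Int)) (row : Int) (col : Int) :
    ColNonzero a row col = ColNonzero_alt a row col := by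
  set C := PySem.List.pyRange 0 col 1 with hC
  set R := PySem.List.pyRange 0 row 1
  set T := a.take row.toNat with hT
  set F : PySem.Set Int → List Int → PySem.Set Int :=
    fun s r => C.foldl (fun s j => if PySem.List.pyGetD r j 1 == 0 then PySem.Set.add s j else s) s
    with hF
  have hbad : ((PySem.List.enumerate a 0).takeWhile (fun p => decide (p.1 < row))).foldl
      (fun s p => F s p.2) PySem.Set.empty = T.foldl F PySem.Set.empty := by
    rw [takeWhile_enumerate a row 0]
    calc (PySem.List.enumerate (a.take (row - 0).toNat) 0).foldl (fun s p => F s p.2)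
          PySem.Set.empty
        = ((PySem.List.enumerate (a.take (row - 0).toNat) 0).map (·.2)).foldl F
          PySem.Set.empty := (List.foldl_map).symm
      _ = T.foldl F PySem.Set.empty := by
          rw [PySem.List.map_snd_enumerate]; norm_num [hT]
  have hA : ColNonzero a row col =
      (C.countP (fun j => !R.any
        (fun i => PySem.List.pyGetD (PySem.List.pyGetD a i []) j 1 == 0)) : Int) := by
    simp only [ColNonzero, ← hC]
    exact foldl_count_not _ C
  have hB : ColNonzero_alt a row col =
      (C.countP (fun j => !PySem.Set.contains (T.foldl F PySem.Set.empty) j) : Int) := by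
    simp only [ColNonzero_alt, ← hC]
    rw [hbad]
    exact PySem.List.sum_map_ite_one_zero _ C
  rw [hA, hB]
  congr 1
  refine List.countP_congr (fun j hj => ?_)
  have hcj : PySem.Set.contains (T.foldl F PySem.Set.empty) j =
      R.any (fun i => PySem.List.pyGetD (PySem.List.pyGetD a i []) j 1 == 0) := by
    rw [Bool.eq_iff_iff, PySem.Set.contains_iff, hF, mem_outer_fold, List.any_eq_true]
    simp only [PySem.Set.empty]
    constructor
    · rintro (h | ⟨-, h⟩)
      · simp at h
      · exact (rows_bridge a row j).mp h
    · intro h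
      exact Or.inr ⟨hj, (rows_bridge a row j).mpr h⟩
  rw [hcj]

-- ===== VERDICT (by name: the statement is the Claim_ definition above) =====
theorem ColNonzero_spec : Claim_equal_ColNonzero := by
  intro a row col _ _
  exact ColNonzero_eq_alt a row col
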